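-- pv_equiv track=rewrite | github.com/dev-azhar/ClaimGPT | services/coding/app/icd10_rag.py | _code_to_category
-- ===== SOURCE A (Python) =====
-- _CHAPTER_MAP: list[tuple[str, str, str]] = [
--     ("A", "B", "Infectious"),
--     ("C", "C", "Neoplasm"),
--     ("D", "D", "Blood/Neoplasm"),  # D00-D49 neoplasm, D50-D89 blood
--     ("E", "E", "Endocrine"),
--     ("F", "F", "Mental"),
--     ("G", "G", "Nervous"),
--     ("H", "H", "Eye/Ear"),  # H00-H59 eye, H60-H95 ear
--     ("I", "I", "Circulatory"),
--     ("J", "J", "Respiratory"),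
--     ("K", "K", "Digestive"),
--     ("L", "L", "Skin"),
--     ("M", "M", "Musculoskeletal"),
--     ("N", "N", "Genitourinary"),
--     ("O", "O", "Pregnancy"),
--     ("P", "P", "Perinatal"),
--     ("Q", "Q", "Congenital"),
--     ("R", "R", "Symptoms"),
--     ("S", "T", "Injury"),
--     ("U", "U", "Special"),
--     ("V", "Y", "External"),
--     ("Z", "Z", "Factors"),
-- ]
--
-- def _code_to_category(code: str) -> str:
--     """Map an ICD-10 code to its clinical chapter/category."""
--     if not code:
--         return "Unknown"
--     ch = code[0].upper()
--     for start, end, cat in _CHAPTER_MAP: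
--         if start <= ch <= end:
--             return cat
--     return "Unknown"
-- ===== SOURCE B (Python) =====
-- _CHAPTER_LOOKUP = {
--     "A": "Infectious", "B": "Infectious",
--     "C": "Neoplasm",
--     "D": "Blood/Neoplasm",
--     "E": "Endocrine",
--     "F": "Mental",
--     "G": "Nervous",
--     "H": "Eye/Ear",
--     "I": "Circulatory",
--     "J": "Respiratory",
--     "K": "Digestive",
--     "L": "Skin",
--     "M": "Musculoskeletal",
--     "N": "Genitourinary",
--     "O": "Pregnancy",
--     "P": "Perinatal",
--     "Q": "Congenital",
--     "R": "Symptoms",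
--     "S": "Injury", "T": "Injury",
--     "U": "Special",
--     "V": "External", "W": "External", "X": "External", "Y": "External",
--     "Z": "Factors",
-- }
--
-- def _code_to_category(code: str) -> str:
--     """Map an ICD-10 code to its clinical chapter/category."""
--     if not code:
--         return "Unknown"
--     return _CHAPTER_LOOKUP.get(code[0].upper(), "Unknown")
-- ===== Notes on version B (the rewrite author's own statement) =====
-- stated objective: idiomatic
-- what changed: Replaced the per-call linear scan over (start,end,category) ranges with a precomputed module-level letter-to-category dict and a single .get lookup with a default.
import Mathlib
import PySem

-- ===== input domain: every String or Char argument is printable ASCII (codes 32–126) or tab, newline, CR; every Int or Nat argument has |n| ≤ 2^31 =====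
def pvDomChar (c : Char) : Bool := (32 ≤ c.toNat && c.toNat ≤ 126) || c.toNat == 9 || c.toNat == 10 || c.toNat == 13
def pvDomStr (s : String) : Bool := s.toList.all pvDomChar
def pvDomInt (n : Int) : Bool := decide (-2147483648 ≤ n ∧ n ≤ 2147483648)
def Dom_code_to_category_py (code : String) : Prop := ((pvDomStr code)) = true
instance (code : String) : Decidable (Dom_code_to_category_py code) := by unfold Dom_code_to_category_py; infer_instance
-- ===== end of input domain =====

-- B replaces A's per-call linear scan over (start,end,category) ranges by a precomputed
-- per-letter lookup table consulted once with dict.get and a default (idiomatic).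

-- ===== PORT A =====
-- the module-level _CHAPTER_MAP (single-character Python strings ported as Char;
-- Python's string comparison on single-character strings equals Char comparison)
def pvChapterMap : List (Char × Char × String) :=
  [('A', 'B', "Infectious"), ('C', 'C', "Neoplasm"), ('D', 'D', "Blood/Neoplasm"),
   ('E', 'E', "Endocrine"), ('F', 'F', "Mental"), ('G', 'G', "Nervous"),
   ('H', 'H', "Eye/Ear"), ('I', 'I', "Circulatory"), ('J', 'J', "Respiratory"),
   ('K', 'K', "Digestive"), ('L', 'L', "Skin"), ('M', 'M', "Musculoskeletal"),
   ('N', 'N', "Genitourinary"), ('O', 'O', "Pregnancy"), ('P', 'P', "Perinatal"),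
   ('Q', 'Q', "Congenital"), ('R', 'R', "Symptoms"), ('S', 'T', "Injury"),
   ('U', 'U', "Special"), ('V', 'Y', "External"), ('Z', 'Z', "Factors")]

-- the 'for start, end, cat in _CHAPTER_MAP: if start <= ch <= end: return cat' loop
def pvScan (ch : Char) : List (Char × Char × String) → String
  | [] => "Unknown"                                            -- fell off the loop
  | (s, e, cat) :: rest => if s ≤ ch ∧ ch ≤ e then cat else pvScan ch rest

def code_to_category_py (code : String) : String :=
  match code.toList with
  | [] => "Unknown"                                            -- if not code
  | c :: _ => pvScan (PySem.Chars.upperChar c) pvChapterMap    -- ch = code[0].upper()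

-- ===== PORT B =====
-- the module-level _CHAPTER_LOOKUP dict literal
def pvChapterLookup : PySem.Dict Char String :=
  PySem.Dict.ofList
    [('A', "Infectious"), ('B', "Infectious"), ('C', "Neoplasm"), ('D', "Blood/Neoplasm"),
     ('E', "Endocrine"), ('F', "Mental"), ('G', "Nervous"), ('H', "Eye/Ear"),
     ('I', "Circulatory"), ('J', "Respiratory"), ('K', "Digestive"), ('L', "Skin"),
     ('M', "Musculoskeletal"), ('N', "Genitourinary"), ('O', "Pregnancy"), ('P', "Perinatal"),
     ('Q', "Congenital"), ('R', "Symptoms"), ('S', "Injury"), ('T', "Injury"),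
     ('U', "Special"), ('V', "External"), ('W', "External"), ('X', "External"),
     ('Y', "External"), ('Z', "Factors")]

def code_to_category_py_alt (code : String) : String :=
  match code.toList with
  | [] => "Unknown"                                            -- if not code
  | c :: _ => pvChapterLookup.getD (PySem.Chars.upperChar c) "Unknown"
      -- _CHAPTER_LOOKUP.get(code[0].upper(), "Unknown")

-- ===== PRECONDITION & SPEC =====
def Spec_code_to_category_py (code : String) (out : String) : Prop := out = code_to_category_py_alt code
instance (code : String) (out : String) : Decidable (Spec_code_to_category_py code out) := by unfold Spec_code_to_category_py; infer_instance

-- ===== CLAIM (what is proved, stated in full; the proofs are below) =====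
def Claim_equal_code_to_category_py : Prop := ∀ (code : String), Dom_code_to_category_py code → Spec_code_to_category_py code (code_to_category_py code)

-- ===== LEMMAS AND PROOFS =====

theorem charLe (a b : Char) : a ≤ b ↔ a.toNat ≤ b.toNat := by
  rw [Char.le_def, UInt32.le_iff_toNat_le]; rfl

theorem charEq (a b : Char) : (a == b) = true ↔ a.toNat = b.toNat := by
  rw [beq_iff_eq]
  constructor
  · intro h; rw [h]
  · intro h; exact Char.ext (UInt32.toNat_inj.mp h)

-- on the 91 characters up to 'Z' the two tables agree, by computation
set_option maxRecDepth 100000 in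
set_option maxHeartbeats 1000000 in
theorem pvSmall : ∀ n : Fin 91,
    pvScan (Char.ofNat n.val) pvChapterMap = pvChapterLookup.getD (Char.ofNat n.val) "Unknown" := by
  decide

-- the scan misses every range whose bounds lie inside 'A'..'Z' when ch is outside
theorem pvScan_unknown (ch : Char) (hn : ¬ (65 ≤ ch.toNat ∧ ch.toNat ≤ 90)) :
    (l : List (Char × Char × String)) →
    (∀ t ∈ l, 65 ≤ t.1.toNat ∧ (t.2.1).toNat ≤ 90) → pvScan ch l = "Unknown"
  | [], _ => rfl
  | (s, e, cat) :: rest, hb => by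
    have hs := hb (s, e, cat) List.mem_cons_self
    rw [pvScan, if_neg]
    · exact pvScan_unknown ch hn rest (fun t ht => hb t (List.mem_cons_of_mem _ ht))
    · rintro ⟨h1, h2⟩
      rw [charLe] at h1 h2
      exact hn ⟨le_trans hs.1 h1, le_trans h2 hs.2⟩

-- the table has no entry for ch outside 'A'..'Z'
theorem pvGet_none (ch : Char) (hn : ¬ (65 ≤ ch.toNat ∧ ch.toNat ≤ 90)) :
    (pairs : List (Char × String)) →
    (∀ p ∈ pairs, 65 ≤ p.1.toNat ∧ p.1.toNat ≤ 90) →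
    (PySem.Dict.mk pairs).get? ch = none
  | [], _ => (PySem.Dict.get?_eq_none_iff_contains { items := [] } ch).mpr rfl
  | (k, v) :: rest, hb => by
    rw [PySem.Dict.get?_mk_cons, if_neg]
    · exact pvGet_none ch hn rest (fun p hp => hb p (List.mem_cons_of_mem _ hp))
    · intro h
      rw [charEq] at h
      have hk := hb (k, v) List.mem_cons_self
      exact hn ⟨h ▸ hk.1, h ▸ hk.2⟩

theorem pvScan_eq_lookup (ch : Char) :
    pvScan ch pvChapterMap = pvChapterLookup.getD ch "Unknown" := by
  by_cases h : 65 ≤ ch.toNat ∧ ch.toNat ≤ 90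
  · have h91 : ch.toNat < 91 := by omega
    have := pvSmall ⟨ch.toNat, h91⟩
    rwa [Char.ofNat_toNat] at this
  · rw [pvScan_unknown ch h pvChapterMap (by decide)]
    have hget : pvChapterLookup.get? ch = none := by
      have hmk : pvChapterLookup = PySem.Dict.mk pvChapterLookup.items := rfl
      rw [hmk]
      exact pvGet_none ch h _ (by decide)
    rw [PySem.Dict.getD, hget]
    rfl

-- ===== VERDICT (by name: the statement is the Claim_ definition above) =====
theorem code_to_category_py_spec : Claim_equal_code_to_category_py := by
  intro code _
  unfold Spec_code_to_category_py code_to_category_py code_to_category_py_alt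
  cases code.toList with
  | nil => rfl
  | cons c rest => exact pvScan_eq_lookup _
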